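-- pv_equiv track=rewrite | github.com/GanglyPuma22/BatteryReportGenerator | pages/reportgenerator.py | dischargeComplete
-- ===== SOURCE A (Python) =====
-- def dischargeComplete(data):
--     firstZeroVal = 0
--     zeroCounter = 0
--
--     for i in range(0, len(data)):
--         if data[i] == 0:
--             firstZeroVal = i
--
--         if firstZeroVal != 0 :
--             zeroCounter = zeroCounter + 1
--             if zeroCounter == 15*60: #after 15 min return timestamp
--                 return i
--
--     return -1
-- ===== SOURCE B (Python) =====
-- def dischargeComplete(data):
--     n = len(data)
--     for j in range(1, n):
--         if data[j] == 0:
--             target = j + 899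
--             return target if target < n else -1
--     return -1
-- ===== Notes on version B (the rewrite author's own statement) =====
-- stated objective: simpler
-- what changed: Replaces A's stateful iterate-and-count-to-900 loop with a scan for the first zero at index >= 1 followed by a closed-form index computation (j + 899, bounds-checked).
import Mathlib
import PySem

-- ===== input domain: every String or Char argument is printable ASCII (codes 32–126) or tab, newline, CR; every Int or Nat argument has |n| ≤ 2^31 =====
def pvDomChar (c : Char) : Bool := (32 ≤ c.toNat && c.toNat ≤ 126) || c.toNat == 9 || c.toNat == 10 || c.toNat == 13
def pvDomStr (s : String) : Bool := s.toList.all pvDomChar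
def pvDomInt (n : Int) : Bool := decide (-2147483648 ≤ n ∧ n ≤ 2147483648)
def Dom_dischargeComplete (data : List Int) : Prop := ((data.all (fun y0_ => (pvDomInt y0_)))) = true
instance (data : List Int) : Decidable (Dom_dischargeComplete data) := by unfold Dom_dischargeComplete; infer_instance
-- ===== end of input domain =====

-- B replaces A's count-to-900 loop by a first-zero scan plus a closed-form bounds-checked index (simpler; return value only).

-- ===== PORT A =====
-- loop over i in range(0, len(data)) with state (firstZeroVal, zeroCounter); returning inside the loop = returning from the recursion
def dischargeCompleteLoop (rest : List Int) (i firstZeroVal zeroCounter : Int) : Int :=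
  match rest with
  | [] => -1
  | x :: rest' =>
    let fzv := if x = 0 then i else firstZeroVal
    if fzv ≠ 0 then
      let zc := zeroCounter + 1
      if zc = 15 * 60 then i
      else dischargeCompleteLoop rest' (i + 1) fzv zc
    else dischargeCompleteLoop rest' (i + 1) fzv zeroCounter

def dischargeComplete (data : List Int) : Int :=
  dischargeCompleteLoop data 0 0 0

-- ===== PORT B =====
-- loop over j in range(1, n) looking at data[j]; rest = data.drop 1, n = len(data)
def dischargeCompleteAltLoop (rest : List Int) (j n : Int) : Int :=
  match rest with
  | [] => -1
  | x :: rest' =>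
    if x = 0 then
      let target := j + 899
      if target < n then target else -1
    else dischargeCompleteAltLoop rest' (j + 1) n

def dischargeComplete_alt (data : List Int) : Int :=
  dischargeCompleteAltLoop (data.drop 1) 1 (data.length : Int)

-- ===== PRECONDITION & SPEC =====
def Spec_dischargeComplete (data : List Int) (out : Int) : Prop := out = dischargeComplete_alt data
instance (data : List Int) (out : Int) : Decidable (Spec_dischargeComplete data out) := by unfold Spec_dischargeComplete; infer_instance

-- ===== CLAIM (what is proved, stated in full; the proofs are below) =====
def Claim_equal_dischargeComplete : Prop := ∀ (data : List Int), Dom_dischargeComplete data → Spec_dischargeComplete data (dischargeComplete data)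

-- ===== LEMMAS AND PROOFS =====

-- once a zero has been seen (fzv ≠ 0, counting started), A returns i + 899 - zc if the list is long enough, else -1
theorem aLoop_counting (rest : List Int) :
    ∀ (i fzv zc : Int), fzv ≠ 0 → 1 ≤ i → 0 ≤ zc → zc < 900 →
      dischargeCompleteLoop rest i fzv zc =
        if 900 - zc ≤ (rest.length : Int) then i + 899 - zc else -1 := by
  induction rest with
  | nil =>
    intro i fzv zc hf hi h0 h9
    simp [dischargeCompleteLoop]
    omega
  | cons x rest' ih =>
    intro i fzv zc hf hi h0 h9
    simp only [dischargeCompleteLoop]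
    have hfzv' : (if x = 0 then i else fzv) ≠ 0 := by
      split <;> omega
    rw [if_pos hfzv']
    by_cases h899 : zc + 1 = 15 * 60
    · rw [if_pos h899]
      have : 900 - zc ≤ ((x :: rest').length : Int) := by
        simp; omega
      rw [if_pos this]; omega
    · rw [if_neg h899]
      rw [ih (i + 1) _ (zc + 1) hfzv' (by omega) (by omega) (by omega)]
      simp only [List.length_cons]
      push_cast
      split <;> split <;> omega

-- before any zero has been seen, A's loop (state 0,0) agrees with B's scan, n = i + |rest|
theorem aLoop_scan (rest : List Int) :
    ∀ (i : Int), 1 ≤ i →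
      dischargeCompleteLoop rest i 0 0 = dischargeCompleteAltLoop rest i (i + (rest.length : Int)) := by
  induction rest with
  | nil => intro i hi; simp [dischargeCompleteLoop, dischargeCompleteAltLoop]
  | cons x rest' ih =>
    intro i hi
    simp only [dischargeCompleteLoop, dischargeCompleteAltLoop]
    by_cases hx : x = 0
    · rw [if_pos hx]
      simp only [if_pos hx]
      have hne : (i : Int) ≠ 0 := by omega
      rw [if_pos hne, if_neg (by omega : ¬ (0 + 1 : Int) = 15 * 60)]
      rw [show ((0 : Int) + 1) = 1 by norm_num]
      rw [aLoop_counting rest' (i + 1) i 1 hne (by omega) (by omega) (by omega)]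
      simp only [List.length_cons]
      push_cast
      split <;> split <;> omega
    · rw [if_neg hx]
      simp only [if_neg hx, if_neg (by simp : ¬ (0 : Int) ≠ 0)]
      rw [ih (i + 1) (by omega)]
      congr 1
      simp only [List.length_cons]
      push_cast
      ring

-- ===== VERDICT (by name: the statement is the Claim_ definition above) =====
theorem dischargeComplete_spec : Claim_equal_dischargeComplete := by
  intro data _
  unfold Spec_dischargeComplete dischargeComplete dischargeComplete_alt
  cases data with
  | nil => simp [dischargeCompleteLoop, dischargeCompleteAltLoop]
  | cons x rest =>
    simp only [dischargeCompleteLoop, List.drop_one, List.tail_cons, List.length_cons]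
    rw [if_neg (by split <;> simp)]
    rw [show (if x = (0 : Int) then (0 : Int) else 0) = 0 by split <;> rfl]
    rw [show ((0 : Int) + 1) = 1 by norm_num]
    rw [aLoop_scan rest 1 (by omega)]
    congr 1
    push_cast
    ring
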